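-- pv_equiv track=rewrite | github.com/serabe91/Entrega_1 | code_v2.py | identificar_regiones
-- ===== SOURCE A (Python) =====
-- def identificar_regiones(secuencia, tam_bloque=1000, tam_cds=500):
--     """
--     Divide la secuencia en bloques de regiones codificantes y no codificantes.
--     Alterna bloques codificantes y no codificantes, y devuelve el rango de posiciones.
--     """
--     regiones_codificantes = []
--     regiones_no_codificantes = []
--
--     for i in range(0, len(secuencia), tam_bloque):
--         if (i // tam_bloque) % 2 == 0:  # Cada dos bloques, se asume codificante
--             fin = i + tam_cds
--             regiones_codificantes.append((i + 1, fin))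
--         else:
--             fin = i + tam_bloque
--             regiones_no_codificantes.append((i + 1, fin))
--
--     return regiones_codificantes, regiones_no_codificantes
-- ===== SOURCE B (Python) =====
-- def identificar_regiones(secuencia, tam_bloque=1000, tam_cds=500):
--     n = len(secuencia)
--     paso = 2 * tam_bloque
--     regiones_codificantes = [(i + 1, i + tam_cds) for i in range(0, n, paso)]
--     regiones_no_codificantes = [(i + 1, i + tam_bloque) for i in range(tam_bloque, n, paso)]
--     return regiones_codificantes, regiones_no_codificantes
-- ===== Notes on version B (the rewrite author's own statement) =====
-- stated objective: simpler
-- what changed: Replaces the single parity-branching loop with two independent stride-2*tam_bloque range comprehensions, one building the coding list and one the non-coding list, with no per-iteration parity test or branch.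
import Mathlib
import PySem

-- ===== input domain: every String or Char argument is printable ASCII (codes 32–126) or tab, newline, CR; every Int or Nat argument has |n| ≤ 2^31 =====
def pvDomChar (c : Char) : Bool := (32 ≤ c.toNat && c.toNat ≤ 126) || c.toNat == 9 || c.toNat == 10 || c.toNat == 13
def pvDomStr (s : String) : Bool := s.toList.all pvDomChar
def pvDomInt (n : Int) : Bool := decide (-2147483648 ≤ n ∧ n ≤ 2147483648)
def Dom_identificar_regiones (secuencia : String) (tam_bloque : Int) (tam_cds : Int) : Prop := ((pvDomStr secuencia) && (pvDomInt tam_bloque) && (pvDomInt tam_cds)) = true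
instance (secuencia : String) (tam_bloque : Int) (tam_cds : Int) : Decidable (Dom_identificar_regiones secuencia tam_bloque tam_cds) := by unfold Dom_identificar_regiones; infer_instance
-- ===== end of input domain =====

-- B replaces A's single parity-branching loop by two independent stride-2*tam_bloque passes
-- (one per output list); objective: simpler. Equal return values for every tam_bloque ≠ 0.

-- ===== PORT A =====
def identificar_regiones (secuencia : String) (tam_bloque : Int) (tam_cds : Int) : (List (Int × Int)) × (List (Int × Int)) :=
  (PySem.List.pyRange 0 (PySem.Str.len secuencia) tam_bloque).foldl
    (fun (acc : List (Int × Int) × List (Int × Int)) i =>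
      if PySem.Int.mod (PySem.Int.floordiv i tam_bloque) 2 = 0 then
        (acc.1 ++ [(i + 1, i + tam_cds)], acc.2)
      else
        (acc.1, acc.2 ++ [(i + 1, i + tam_bloque)]))
    ([], [])

-- ===== PORT B =====
def identificar_regiones_alt (secuencia : String) (tam_bloque : Int) (tam_cds : Int) : (List (Int × Int)) × (List (Int × Int)) :=
  let n := PySem.Str.len secuencia
  let paso := 2 * tam_bloque
  ((PySem.List.pyRange 0 n paso).map (fun i => (i + 1, i + tam_cds)),
   (PySem.List.pyRange tam_bloque n paso).map (fun i => (i + 1, i + tam_bloque)))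

-- ===== PRECONDITION & SPEC =====
-- Pre_ excludes only tam_bloque = 0, where Python A raises ValueError (range step 0).
def Pre_identificar_regiones (secuencia : String) (tam_bloque : Int) (tam_cds : Int) : Prop := tam_bloque ≠ 0
instance (secuencia : String) (tam_bloque : Int) (tam_cds : Int) : Decidable (Pre_identificar_regiones secuencia tam_bloque tam_cds) := by unfold Pre_identificar_regiones; infer_instance
def pvWitness_identificar_regiones : String × Int × Int := ("ACGTACGT", 2, 1)

def Spec_identificar_regiones (secuencia : String) (tam_bloque : Int) (tam_cds : Int) (out : (List (Int × Int)) × (List (Int × Int))) : Prop := out = identificar_regiones_alt secuencia tam_bloque tam_cds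
instance (secuencia : String) (tam_bloque : Int) (tam_cds : Int) (out : (List (Int × Int)) × (List (Int × Int))) : Decidable (Spec_identificar_regiones secuencia tam_bloque tam_cds out) := by unfold Spec_identificar_regiones; infer_instance

-- ===== CLAIM (what is proved, stated in full; the proofs are below) =====
def Claim_equal_identificar_regiones : Prop := ∀ (secuencia : String) (tam_bloque : Int) (tam_cds : Int), Dom_identificar_regiones secuencia tam_bloque tam_cds → Pre_identificar_regiones secuencia tam_bloque tam_cds → Spec_identificar_regiones secuencia tam_bloque tam_cds (identificar_regiones secuencia tam_bloque tam_cds)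

-- ===== LEMMAS AND PROOFS =====

theorem pvRange_pos_nil {a b s : Int} (hs : 0 < s) (h : b ≤ a) :
    PySem.List.pyRange a b s = [] := by
  simp [PySem.List.pyRange, hs.ne', hs, not_lt.mpr h]

theorem pvRange_neg_nil {a b s : Int} (hs : s < 0) (h : a ≤ b) :
    PySem.List.pyRange a b s = [] := by
  simp [PySem.List.pyRange, hs.ne, not_lt.mpr hs.le, not_lt.mpr h]

theorem pvRange_pos_cons {a b s : Int} (hs : 0 < s) (h : a < b) :
    PySem.List.pyRange a b s = a :: PySem.List.pyRange (a + s) b s := by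
  rw [PySem.List.pyRange_of_pos a b hs, PySem.List.pyRange_of_pos (a + s) b hs]
  rw [if_pos h]
  by_cases h2 : a + s < b
  · rw [if_pos h2]
    have hcount : ((b - a + s - 1) / s).toNat = ((b - (a + s) + s - 1) / s).toNat + 1 := by
      have he : b - a + s - 1 = (b - (a + s) + s - 1) + 1 * s := by ring
      rw [he, Int.add_mul_ediv_right _ _ hs.ne']
      have h0 : 0 ≤ (b - (a + s) + s - 1) / s :=
        Int.ediv_nonneg (by omega) (by omega)
      omega
    rw [hcount, List.range_succ_eq_map]
    simp only [List.map_cons, List.map_map]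
    congr 1
    · norm_num
    · apply List.map_congr_left
      intro k _
      simp only [Function.comp_apply]
      push_cast
      ring
  · rw [if_neg h2]
    have h1 : 1 ≤ (b - a + s - 1) / s := by
      rw [Int.le_ediv_iff_mul_le hs]
      omega
    have h2' : (b - a + s - 1) / s < 2 := by
      rw [Int.ediv_lt_iff_lt_mul hs]
      omega
    have : ((b - a + s - 1) / s).toNat = 1 := by omega
    rw [this]
    simp

-- loop invariant for A's fold, with the running index written as j * s
theorem pvKey (n s cds : Int) (hs : 0 < s) :
    ∀ (t : Nat) (j : Int) (c d : List (Int × Int)),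
      (n - j * s).toNat ≤ t →
      (PySem.List.pyRange (j * s) n s).foldl
        (fun (acc : List (Int × Int) × List (Int × Int)) i =>
          if PySem.Int.mod (PySem.Int.floordiv i s) 2 = 0 then
            (acc.1 ++ [(i + 1, i + cds)], acc.2)
          else
            (acc.1, acc.2 ++ [(i + 1, i + s)]))
        (c, d) =
      (if j % 2 = 0 then
        (c ++ (PySem.List.pyRange (j * s) n (2 * s)).map (fun i => (i + 1, i + cds)),
         d ++ (PySem.List.pyRange ((j + 1) * s) n (2 * s)).map (fun i => (i + 1, i + s)))
       else
        (c ++ (PySem.List.pyRange ((j + 1) * s) n (2 * s)).map (fun i => (i + 1, i + cds)),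
         d ++ (PySem.List.pyRange (j * s) n (2 * s)).map (fun i => (i + 1, i + s)))) := by
  intro t
  induction t with
  | zero =>
    intro j c d ht
    have hjs : n ≤ j * s := by omega
    have hjs1 : n ≤ (j + 1) * s := by nlinarith
    rw [pvRange_pos_nil hs hjs, pvRange_pos_nil (by omega) hjs,
        pvRange_pos_nil (by omega : (0:Int) < 2 * s) hjs1]
    split <;> simp
  | succ t ih =>
    intro j c d ht
    by_cases h : j * s < n
    · have hcons := pvRange_pos_cons hs h
      have heq : j * s + s = (j + 1) * s := by ring
      rw [hcons, List.foldl_cons, heq]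
      have hfd : PySem.Int.floordiv (j * s) s = j := by
        simp [PySem.Int.floordiv, Int.mul_fdiv_cancel _ hs.ne']
      have hmod : PySem.Int.mod (PySem.Int.floordiv (j * s) s) 2 = j % 2 := by
        rw [hfd]; simp [PySem.Int.mod, Int.fmod_eq_emod]
      have hfuel : (n - (j + 1) * s).toNat ≤ t := by
        have : (j + 1) * s = j * s + s := by ring
        omega
      have ihj := ih (j + 1) ; clear ih
      by_cases hj : j % 2 = 0
      · rw [hmod, if_pos hj]
        rw [ihj _ _ hfuel]
        have hj1 : ¬ (j + 1) % 2 = 0 := by omega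
        rw [if_neg hj1]
        have hcons2 := pvRange_pos_cons (by omega : (0:Int) < 2 * s) h
        have heq2 : j * s + 2 * s = (j + 1 + 1) * s := by ring
        rw [if_pos hj, hcons2, heq2]
        simp
      · rw [hmod, if_neg hj]
        rw [ihj _ _ hfuel]
        have hj1 : (j + 1) % 2 = 0 := by omega
        rw [if_pos hj1]
        have hcons2 := pvRange_pos_cons (by omega : (0:Int) < 2 * s) h
        have heq2 : j * s + 2 * s = (j + 1 + 1) * s := by ring
        rw [if_neg hj, hcons2, heq2]
        simp
        ring
    · have hjs : n ≤ j * s := by omega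
      have hjs1 : n ≤ (j + 1) * s := by nlinarith
      rw [pvRange_pos_nil hs hjs, pvRange_pos_nil (by omega) hjs,
          pvRange_pos_nil (by omega : (0:Int) < 2 * s) hjs1]
      split <;> simp

theorem pvLenNonneg (s : String) : 0 ≤ PySem.Str.len s := by
  simp [PySem.Str.len]

-- ===== VERDICT (by name: the statement is the Claim_ definition above) =====
theorem identificar_regiones_spec : Claim_equal_identificar_regiones := by
  intro secuencia tb cds _ hpre
  unfold Spec_identificar_regiones identificar_regiones identificar_regiones_alt
  dsimp only
  have hn : 0 ≤ PySem.Str.len secuencia := pvLenNonneg secuencia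
  set n := PySem.Str.len secuencia with hndef
  rcases lt_or_gt_of_ne hpre with hneg | hpos
  · rw [pvRange_neg_nil hneg hn, pvRange_neg_nil (by omega : 2 * tb < 0) hn,
        pvRange_neg_nil (by omega : 2 * tb < 0) (by omega : tb ≤ n)]
    simp
  · have := pvKey n tb cds hpos n.toNat 0 [] [] (by omega)
    simp only [zero_mul, zero_add, one_mul] at this
    rw [this]
    norm_num
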